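-- pv_equiv track=rewrite | github.com/qn06142/coding-python | countnum.py | calculate_total_similarity
-- ===== SOURCE A (Python) =====
-- def calculate_total_similarity(n, numbers):
--     from collections import defaultdict
--
--     # Initialize frequency dictionary for each digit place (0-8)
--     digit_position_count = [defaultdict(int) for _ in range(9)]
--
--     # Populate the frequency dictionary
--     for number in numbers:
--         str_num = str(number)[::-1]  # Reverse the number to process digits from unit place
--         for i, digit in enumerate(str_num):
--             digit_position_count[i][digit] += 1
--
--     total_similarity = 0
--
--     # Calculate the total similarity
--     for number in numbers:
--         str_num = str(number)[::-1]
--         for i, digit in enumerate(str_num):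
--             count = digit_position_count[i][digit] - 1  # Exclude the number itself
--             total_similarity += count
--
--     return total_similarity // 2
-- ===== SOURCE B (Python) =====
-- def calculate_total_similarity(n, numbers):
--     from collections import Counter
--     counts = Counter(
--         (len(s) - 1 - i, d)
--         for s in map(str, numbers)
--         for i, d in enumerate(s)
--     )
--     return sum(c * (c - 1) // 2 for c in counts.values())
-- ===== Notes on version B (the rewrite author's own statement) =====
-- stated objective: simpler
-- what changed: B keeps a single frequency pass (one Counter keyed by (position-from-right, digit)) and replaces A's second pass over all the numbers by a walk over the aggregated buckets, adding count*(count-1)//2 per bucket instead of summing (count-1) per occurrence and halving at the end.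
import Mathlib
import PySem

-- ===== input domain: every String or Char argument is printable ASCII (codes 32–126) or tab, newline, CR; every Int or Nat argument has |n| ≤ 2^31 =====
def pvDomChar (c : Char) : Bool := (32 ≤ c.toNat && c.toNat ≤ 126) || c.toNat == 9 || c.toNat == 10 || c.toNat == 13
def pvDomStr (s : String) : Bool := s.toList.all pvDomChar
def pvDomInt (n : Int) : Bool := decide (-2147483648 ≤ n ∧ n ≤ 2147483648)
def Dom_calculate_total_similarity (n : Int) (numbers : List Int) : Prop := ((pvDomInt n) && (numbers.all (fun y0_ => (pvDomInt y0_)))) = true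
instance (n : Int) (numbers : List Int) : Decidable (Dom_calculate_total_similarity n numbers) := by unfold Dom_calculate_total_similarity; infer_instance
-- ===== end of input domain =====

-- B replaces A's second pass over the numbers by a walk over the aggregated frequency
-- buckets, summing count*(count-1)//2 per bucket (simpler: one scan of the data instead of two).

-- ===== PORT A =====
-- str(number)[::-1] is ported as (toStr number).toList.reverse; digit_position_count[i][digit] += 1
-- is List.modify at list index i (Python raises IndexError for i ≥ 9 — those inputs are excluded
-- by Pre_; the defaultdict read in the second pass inserts a 0 for a missing key, but the key is
-- always present there, so the returned value is unaffected).
def calculate_total_similarity (n : Int) (numbers : List Int) : Int :=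
  let table : List (PySem.Dict Char Int) :=
    numbers.foldl
      (fun t number =>
        (PySem.List.enumerate ((PySem.Int.toStr number).toList.reverse) 0).foldl
          (fun t p => t.modify p.1.toNat (fun dd => dd.modify p.2 0 (· + 1))) t)
      (List.replicate 9 PySem.Dict.empty)
  let total : Int :=
    numbers.foldl
      (fun acc number =>
        (PySem.List.enumerate ((PySem.Int.toStr number).toList.reverse) 0).foldl
          (fun acc p => acc + ((PySem.List.pyGetD table p.1 PySem.Dict.empty).getD p.2 0 - 1)) acc)
      0
  PySem.Int.floordiv total 2

-- ===== PORT B =====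
def calculate_total_similarity_alt (n : Int) (numbers : List Int) : Int :=
  let counts : PySem.Dict (Int × Char) Int :=
    PySem.Dict.counter
      (numbers.flatMap (fun number =>
        let s := (PySem.Int.toStr number).toList
        (PySem.List.enumerate s 0).map (fun p => ((s.length : Int) - 1 - p.1, p.2))))
  (counts.values.map (fun c => PySem.Int.floordiv (c * (c - 1)) 2)).sum

-- ===== PRECONDITION & SPEC =====
-- Pre_ excludes exactly the inputs on which A raises IndexError: a number whose str() has
-- more than 9 characters overruns A's fixed table of 9 digit positions.
def Pre_calculate_total_similarity (n : Int) (numbers : List Int) : Prop :=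
  ∀ x ∈ numbers, (PySem.Int.toChars x).length ≤ 9
instance (n : Int) (numbers : List Int) : Decidable (Pre_calculate_total_similarity n numbers) := by unfold Pre_calculate_total_similarity; infer_instance

def pvWitness_calculate_total_similarity : Int × List Int := (3, [12, 345, -7])

def Spec_calculate_total_similarity (n : Int) (numbers : List Int) (out : Int) : Prop := out = calculate_total_similarity_alt n numbers
instance (n : Int) (numbers : List Int) (out : Int) : Decidable (Spec_calculate_total_similarity n numbers out) := by unfold Spec_calculate_total_similarity; infer_instance

-- ===== CLAIM (what is proved, stated in full; the proofs are below) =====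
def Claim_equal_calculate_total_similarity : Prop := ∀ (n : Int) (numbers : List Int), Dom_calculate_total_similarity n numbers → Pre_calculate_total_similarity n numbers → Spec_calculate_total_similarity n numbers (calculate_total_similarity n numbers)

-- ===== LEMMAS AND PROOFS =====

-- the multiset of (position-from-the-right, digit-character) keys, as A generates it
def pvAK (numbers : List Int) : List (Int × Char) :=
  numbers.flatMap (fun x => PySem.List.enumerate ((PySem.Int.toChars x).reverse) 0)

-- the same multiset as B generates it
def pvBK (numbers : List Int) : List (Int × Char) :=
  numbers.flatMap (fun x =>
    (PySem.List.enumerate (PySem.Int.toChars x) 0).map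
      (fun p => (((PySem.Int.toChars x).length : Int) - 1 - p.1, p.2)))

def pvRead (t : List (PySem.Dict Char Int)) (i : Int) (d : Char) : Int :=
  (PySem.List.pyGetD t i PySem.Dict.empty).getD d 0

def pvBump (t : List (PySem.Dict Char Int)) (p : Int × Char) : List (PySem.Dict Char Int) :=
  t.modify p.1.toNat (fun dd => dd.modify p.2 0 (· + 1))

theorem pvRead_bump (t : List (PySem.Dict Char Int)) (p : Int × Char) (i : Int) (d : Char)
    (hp0 : 0 ≤ p.1) (hi0 : 0 ≤ i) (hi : i.toNat < t.length) :
    pvRead (pvBump t p) i d = pvRead t i d + (if (i, d) = p then 1 else 0) := by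
  unfold pvRead pvBump
  rw [PySem.List.pyGetD_of_nonneg _ _ hi0, PySem.List.pyGetD_of_nonneg _ _ hi0]
  have hlen : i.toNat < (t.modify p.1.toNat (fun dd => dd.modify p.2 0 (· + 1))).length := by
    simpa [List.length_modify] using hi
  rw [List.getD_eq_getElem _ _ hlen, List.getD_eq_getElem _ _ hi, List.getElem_modify]
  by_cases hidx : p.1.toNat = i.toNat
  · simp only [if_pos hidx]
    rw [PySem.Dict.getD_modify]
    have hij : p.1 = i := by omega
    by_cases hch : d = p.2
    · simp [hch, hij, Prod.ext_iff]
    · simp [hch, Prod.ext_iff]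
  · have : ¬ (i, d) = p := by
      intro h; apply hidx; cases p; cases h; rfl
    simp [hidx, this]

theorem pvRead_foldl (ks : List (Int × Char)) (t : List (PySem.Dict Char Int))
    (hks : ∀ p ∈ ks, 0 ≤ p.1) (i : Int) (d : Char) (hi0 : 0 ≤ i) (hi : i.toNat < t.length) :
    pvRead (ks.foldl pvBump t) i d = pvRead t i d + (ks.count (i, d) : Int) := by
  induction ks generalizing t with
  | nil => simp
  | cons p rest ih =>
    have hlen : (pvBump t p).length = t.length := by simp [pvBump, List.length_modify]
    rw [List.foldl_cons, ih (pvBump t p) (fun q hq => hks q (List.mem_cons_of_mem _ hq)) (by rw [hlen]; exact hi)]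
    rw [pvRead_bump t p i d (hks p (List.mem_cons_self)) hi0 hi]
    rw [List.count_cons]
    push_cast
    by_cases h : (i, d) = p
    · simp [h]; ring
    · simp [h, Ne.symm h]

theorem pvEnum_rev (s : List Char) :
    (PySem.List.enumerate s 0).map (fun p => ((s.length : Int) - 1 - p.1, p.2))
      = (PySem.List.enumerate s.reverse 0).reverse := by
  apply List.ext_getElem
  · simp [PySem.List.length_enumerate]
  · intro k h1 h2
    simp only [List.getElem_map, List.getElem_reverse, PySem.List.length_enumerate,
      List.length_reverse] at *
    rw [PySem.List.getElem_enumerate, PySem.List.getElem_enumerate]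
    have hk : k < s.length := by simpa [PySem.List.length_enumerate] using h1
    rw [Prod.ext_iff]
    refine ⟨by push_cast; omega, ?_⟩
    show s[k] = s.reverse[s.length - 1 - k]'(by simp; omega)
    rw [List.getElem_reverse]
    congr 1
    omega

theorem pvBK_perm_pvAK (numbers : List Int) : (pvBK numbers).Perm (pvAK numbers) := by
  unfold pvBK pvAK
  apply List.Perm.flatMap_left
  intro x _
  rw [pvEnum_rev]
  exact List.reverse_perm _

theorem pvValues_eq_map_getD {κ ν : Type} [BEq κ] [LawfulBEq κ] (d : PySem.Dict κ ν) (v0 : ν)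
    (h : d.keys.Nodup) : d.values = d.keys.map (fun k => d.getD k v0) := by
  obtain ⟨items⟩ := d
  induction items with
  | nil => simp [PySem.Dict.values_mk, PySem.Dict.keys_mk]
  | cons kv rest ih =>
    obtain ⟨k, v⟩ := kv
    simp only [PySem.Dict.keys_mk, List.map_cons, List.nodup_cons, List.mem_map] at h
    obtain ⟨hk, hrest⟩ := h
    simp only [PySem.Dict.values_mk, PySem.Dict.keys_mk, List.map_cons]
    congr 1
    · simp [PySem.Dict.getD, PySem.Dict.get?_mk_cons]
    · have := ih (by simpa [PySem.Dict.keys_mk] using hrest)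
      simp only [PySem.Dict.values_mk, PySem.Dict.keys_mk] at this
      rw [this, List.map_map, List.map_map]
      apply List.map_congr_left
      intro p hp
      simp only [Function.comp]
      have hne : ¬ (k == p.1) = true := by
        simp only [beq_iff_eq]; intro hkp; exact hk ⟨p, hp, hkp.symm⟩
      simp [PySem.Dict.getD, PySem.Dict.get?_mk_cons, hne]

theorem pvFloordiv_sum (ls : List Int) (h : ∀ t ∈ ls, 2 ∣ t) :
    PySem.Int.floordiv ls.sum 2 = (ls.map (fun t => PySem.Int.floordiv t 2)).sum := by
  induction ls with
  | nil =>
    simp only [List.sum_nil, List.map_nil]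
    rw [PySem.Int.floordiv_eq_ediv_of_pos (by omega)]; rfl
  | cons a rest ih =>
    have ha := h a List.mem_cons_self
    have hrest : ∀ t ∈ rest, 2 ∣ t := fun t ht => h t (List.mem_cons_of_mem _ ht)
    have hsum : (2:Int) ∣ rest.sum := List.dvd_sum hrest
    simp only [List.sum_cons, List.map_cons]
    rw [PySem.Int.floordiv_eq_ediv_of_pos (by omega), PySem.Int.floordiv_eq_ediv_of_pos (by omega)] at *
    rw [← ih hrest]
    obtain ⟨a', rfl⟩ := ha
    obtain ⟨s', hs⟩ := hsum
    rw [hs]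
    omega

theorem pvAK_mem (numbers : List Int) (hpre : ∀ x ∈ numbers, (PySem.Int.toChars x).length ≤ 9)
    (p : Int × Char) (hp : p ∈ pvAK numbers) : 0 ≤ p.1 ∧ p.1 < 9 := by
  unfold pvAK at hp
  rw [List.mem_flatMap] at hp
  obtain ⟨x, hx, hpx⟩ := hp
  rw [PySem.List.mem_enumerate_iff] at hpx
  obtain ⟨k, hk, rfl⟩ := hpx
  have := hpre x hx
  simp at hk ⊢
  omega

-- A computes floordiv (Σ_{k ∈ pvAK} (count k − 1)) 2
theorem pvA_char (n : Int) (numbers : List Int) (hpre : Pre_calculate_total_similarity n numbers) :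
    calculate_total_similarity n numbers =
      PySem.Int.floordiv
        (((pvAK numbers).map (fun p => ((pvAK numbers).count p : Int) - 1)).sum) 2 := by
  unfold calculate_total_similarity
  simp only [PySem.Int.toList_toStr]
  rw [show (fun (t : List (PySem.Dict Char Int)) (p : Int × Char) => t.modify p.1.toNat (fun dd => dd.modify p.2 0 (· + 1))) = pvBump from rfl]
  rw [← List.foldl_flatMap (f := fun x => PySem.List.enumerate ((PySem.Int.toChars x).reverse) 0)]
  rw [← List.foldl_flatMap (f := fun x => PySem.List.enumerate ((PySem.Int.toChars x).reverse) 0)]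
  rw [show (numbers.flatMap fun x => PySem.List.enumerate ((PySem.Int.toChars x).reverse) 0) = pvAK numbers from rfl]
  rw [PySem.List.foldl_add (pvAK numbers) (fun p => (PySem.List.pyGetD ((pvAK numbers).foldl pvBump (List.replicate 9 PySem.Dict.empty)) p.1 PySem.Dict.empty).getD p.2 0 - 1) 0]
  rw [zero_add]
  congr 1
  apply congrArg List.sum
  apply List.map_congr_left
  intro p hp
  have hrange := pvAK_mem numbers hpre p hp
  have hall : ∀ q ∈ pvAK numbers, 0 ≤ q.1 := fun q hq => (pvAK_mem numbers hpre q hq).1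
  show pvRead ((pvAK numbers).foldl pvBump (List.replicate 9 PySem.Dict.empty)) p.1 p.2 - 1 = _
  rw [pvRead_foldl (pvAK numbers) _ hall p.1 p.2 hrange.1 (by simp; omega)]
  have h0 : pvRead (List.replicate 9 PySem.Dict.empty) p.1 p.2 = 0 := by
    unfold pvRead
    rw [PySem.List.pyGetD_of_nonneg _ _ hrange.1]
    rw [List.getD_eq_getElem _ _ (by simp; omega), List.getElem_replicate]
    rfl
  rw [h0, zero_add]

-- B computes Σ over the distinct keys of count*(count−1)//2
theorem pvB_char (n : Int) (numbers : List Int) :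
    calculate_total_similarity_alt n numbers =
      ((PySem.Set.ofList (pvBK numbers)).map
        (fun k => PySem.Int.floordiv (((pvBK numbers).count k : Int) * (((pvBK numbers).count k : Int) - 1)) 2)).sum := by
  unfold calculate_total_similarity_alt
  simp only [PySem.Int.toList_toStr]
  rw [show (numbers.flatMap fun number => (PySem.List.enumerate (PySem.Int.toChars number) 0).map (fun p => (((PySem.Int.toChars number).length : Int) - 1 - p.1, p.2))) = pvBK numbers from rfl]
  rw [pvValues_eq_map_getD _ 0 (PySem.Dict.nodup_keys_counter _)]
  rw [PySem.Dict.keys_counter, List.map_map]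
  apply congrArg List.sum
  apply List.map_congr_left
  intro k _
  simp [PySem.Dict.getD_counter]

-- the combinatorial identity joining the two characterizations
theorem pvGlue (numbers : List Int) :
    PySem.Int.floordiv
        (((pvAK numbers).map (fun p => ((pvAK numbers).count p : Int) - 1)).sum) 2 =
      ((PySem.Set.ofList (pvBK numbers)).map
        (fun k => PySem.Int.floordiv (((pvBK numbers).count k : Int) * (((pvBK numbers).count k : Int) - 1)) 2)).sum := by
  set K := pvAK numbers with hK
  set S : List (Int × Char) := PySem.Set.ofList (pvBK numbers) with hS
  have hcnt : ∀ k, (pvBK numbers).count k = K.count k :=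
    fun k => (pvBK_perm_pvAK numbers).count_eq k
  have hSnodup : S.Nodup := PySem.Set.nodup_ofList _
  have hSmem : ∀ k, k ∈ S ↔ k ∈ K := by
    intro k
    rw [hS, PySem.Set.mem_ofList]
    exact (pvBK_perm_pvAK numbers).mem_iff
  have hrhs : ((S.map
        (fun k => PySem.Int.floordiv (((pvBK numbers).count k : Int) * (((pvBK numbers).count k : Int) - 1)) 2))).sum
      = ((S.map (fun k => (K.count k : Int) * ((K.count k : Int) - 1))).map (fun t => PySem.Int.floordiv t 2)).sum := by
    rw [List.map_map]
    exact congrArg List.sum (List.map_congr_left (fun k _ => by simp [hcnt k]))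
  rw [hrhs, ← pvFloordiv_sum _ (by
    intro t ht
    rw [List.mem_map] at ht
    obtain ⟨k, _, rfl⟩ := ht
    have := Int.even_mul_succ_self ((K.count k : Int) - 1)
    simpa [mul_comm, sub_add_cancel] using this.two_dvd)]
  congr 1
  rw [Finset.sum_list_map_count K (fun p => (K.count p : Int) - 1)]
  rw [← List.sum_toFinset _ hSnodup]
  have hfin : S.toFinset = K.toFinset := by
    ext m; simp only [List.mem_toFinset]; exact hSmem m
  rw [hfin]
  apply Finset.sum_congr rfl
  intro m _
  rw [nsmul_eq_mul]
  have hcEq : @List.count _ (instBEqOfDecidableEq) m K = List.count m K := by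
    simp only [List.count_eq_countP]
    apply List.countP_congr
    intro a _
    simp [beq_eq_decide]
  rw [hcEq]

-- ===== VERDICT (by name: the statement is the Claim_ definition above) =====
theorem calculate_total_similarity_spec : Claim_equal_calculate_total_similarity := by
  intro n numbers _ hpre
  unfold Spec_calculate_total_similarity
  rw [pvA_char n numbers hpre, pvB_char n numbers, pvGlue numbers]
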